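-- pv_equiv track=rewrite | github.com/zhzLuke96/Tur-ing | turing/lamb.py | simpleTREE
-- ===== SOURCE A (Python) =====
-- def simpleTREE(code):
--     def nextSubTree(code):
--         res = ""
--         counter = 1
--         for c in code:
--             if c is "(":
--                 counter += 1
--             elif c is ")":
--                 counter -= 1
--             if counter is 0:
--                 return res
--             res += c
--         raise Exception("Uncaught SyntaxError: Unexpected token )")
--
--     cur = 0
--     res = []
--     temp = ""
--     while cur < len(code):
--         if code[cur] is "(":
--             if len(temp) is not 0:
--                 res += temp.split(" ")
--                 temp = ""
--             n = nextSubTree(code[cur + 1:])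
--             res.append(f"({n})")
--             cur += len(n) + 1
--         elif code[cur] not in " \n\t":
--             temp += code[cur]
--         cur += 1
--     return res
-- ===== SOURCE B (Python) =====
-- def simpleTREE(code):
--     res = []
--     temp = []
--     group = []
--     depth = 0
--     for c in code:
--         if depth == 0:
--             if c == "(":
--                 if temp:
--                     res.append("".join(temp))
--                     temp = []
--                 group = []
--                 depth = 1
--             elif c not in " \n\t":
--                 temp.append(c)
--         else:
--             if c == "(":
--                 depth += 1
--             elif c == ")":
--                 depth -= 1
--                 if depth == 0:
--                     res.append("(%s)" % "".join(group))
--                     continue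
--             group.append(c)
--     if depth != 0:
--         raise ValueError("Uncaught SyntaxError: Unexpected token )")
--     return res
-- ===== Notes on version B (the rewrite author's own statement) =====
-- stated objective: faster
-- what changed: Replaces A's nested nextSubTree scan over a fresh slice code[cur+1:] for every group by a single left-to-right pass that maintains a depth counter and the current group buffer, so no slicing or re-scanning ever happens.
import Mathlib
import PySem

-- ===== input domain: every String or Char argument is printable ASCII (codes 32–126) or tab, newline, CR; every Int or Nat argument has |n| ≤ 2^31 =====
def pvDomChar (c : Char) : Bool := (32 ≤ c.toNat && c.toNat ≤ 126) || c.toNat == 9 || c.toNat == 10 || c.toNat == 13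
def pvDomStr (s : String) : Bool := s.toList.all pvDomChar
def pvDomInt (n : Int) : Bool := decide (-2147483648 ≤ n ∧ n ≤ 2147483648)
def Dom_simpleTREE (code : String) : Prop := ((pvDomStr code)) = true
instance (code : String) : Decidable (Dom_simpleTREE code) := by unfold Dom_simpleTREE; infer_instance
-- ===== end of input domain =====

-- B replaces A's re-slicing inner scan (nextSubTree on code[cur+1:]) by a single pass with a
-- depth counter; equivalence is about the return value only (A raises on unmatched '(' — excluded by Pre_).

-- ===== PORT A =====
-- nextSubTree(code): counter starts at 1; returns the chars before the matching ')'; none = the raise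
def nextSubTreeA : List Char → Int → List Char → Option (List Char)
  | [], _, _ => none
  | c :: rest, counter, res =>
    let counter' := if c = '(' then counter + 1 else if c = ')' then counter - 1 else counter
    if counter' = 0 then some res else nextSubTreeA rest counter' (res ++ [c])

-- the while loop over cur, modeled by recursion on the remaining suffix code[cur:]
-- (cur only moves forward; code[cur+1:] is exactly `rest`); the raise path returns []
def loopA : List Char → List (List Char) → List Char → List (List Char)
  | [], res, _ => res
  | c :: rest, res, temp =>
    if c = '(' then
      let res' := if temp.length ≠ 0 then res ++ PySem.Chars.splitOn temp [' '] else res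
      match nextSubTreeA rest 1 [] with
      | none => []      -- Python raises here (outside Pre_)
      | some n => loopA (rest.drop (n.length + 1)) (res' ++ [('(' :: n) ++ [')']]) []
    else if ¬ (c = ' ' ∨ c = '\n' ∨ c = '\t') then
      loopA rest res (temp ++ [c])
    else
      loopA rest res temp
termination_by l => l.length
decreasing_by all_goals simp

def simpleTREE (code : String) : List String :=
  (loopA code.toList [] []).map String.ofList

-- ===== PORT B =====
-- one pass: depth counter, current token `temp`, current group body `grp`; raise path returns []
def loopB : List Char → List (List Char) → List Char → List Char → Int → List (List Char)
  | [], res, _, _, d => if d ≠ 0 then [] else res   -- Python raises when d ≠ 0 (outside Pre_)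
  | c :: rest, res, temp, grp, d =>
    if d = 0 then
      if c = '(' then
        loopB rest (if temp ≠ [] then res ++ [temp] else res) [] [] 1
      else if ¬ (c = ' ' ∨ c = '\n' ∨ c = '\t') then
        loopB rest res (temp ++ [c]) grp 0
      else
        loopB rest res temp grp 0
    else
      if c = '(' then loopB rest res temp (grp ++ [c]) (d + 1)
      else if c = ')' then
        if d - 1 = 0 then loopB rest (res ++ [('(' :: grp) ++ [')']]) temp grp 0
        else loopB rest res temp (grp ++ [c]) (d - 1)
      else loopB rest res temp (grp ++ [c]) d

def simpleTREE_alt (code : String) : List String :=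
  (loopB code.toList [] [] [] 0).map String.ofList

-- ===== PRECONDITION & SPEC =====
-- excludes exactly the inputs with an unmatched '(' — those on which Python A raises its Exception:
-- a '(' stays unmatched iff some suffix of the code contains more '(' than ')'
def Pre_simpleTREE (code : String) : Prop :=
  ∀ t ∈ code.toList.tails, t.count '(' ≤ t.count ')'
instance (code : String) : Decidable (Pre_simpleTREE code) := by unfold Pre_simpleTREE; infer_instance

def pvWitness_simpleTREE : String := "(a b) c"

def Spec_simpleTREE (code : String) (out : List String) : Prop := out = simpleTREE_alt code
instance (code : String) (out : List String) : Decidable (Spec_simpleTREE code out) := by unfold Spec_simpleTREE; infer_instance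

-- ===== CLAIM (what is proved, stated in full; the proofs are below) =====
def Claim_equal_simpleTREE : Prop := ∀ (code : String), Dom_simpleTREE code → Pre_simpleTREE code → Spec_simpleTREE code (simpleTREE code)

-- ===== LEMMAS AND PROOFS =====

-- common specification of the group scan: content before the char closing depth d, and the suffix after it
def pvScan : List Char → Int → Option (List Char × List Char)
  | [], _ => none
  | c :: rest, d =>
    let d' := if c = '(' then d + 1 else if c = ')' then d - 1 else d
    if d' = 0 then some ([], rest)
    else (pvScan rest d').map (fun p => (c :: p.1, p.2))

theorem splitOn_no_space_go (l : List Char) : ∀ (fuel : Nat) (cur : List Char) (acc : List (List Char)),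
    l.length < fuel → ' ' ∉ l →
    PySem.Chars.splitOn.go [' '] fuel l cur acc = acc.reverse ++ [cur.reverse ++ l] := by
  induction l with
  | nil =>
    intro fuel cur acc _ _
    cases fuel <;> simp [PySem.Chars.splitOn.go]
  | cons c rest ih =>
    intro fuel cur acc hf hs
    cases fuel with
    | zero => omega
    | succ f =>
      have hc : c ≠ ' ' := by intro h; exact hs (h ▸ List.mem_cons_self)
      have hrest : ' ' ∉ rest := fun h => hs (List.mem_cons_of_mem _ h)
      simp only [PySem.Chars.splitOn.go, List.isPrefixOf]
      rw [if_neg (by simp; exact fun h => hc h.symm)]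
      rw [ih f (c :: cur) acc (by simpa using Nat.lt_of_succ_lt_succ hf) hrest]
      simp

theorem splitOn_no_space (cs : List Char) (h : ' ' ∉ cs) :
    PySem.Chars.splitOn cs [' '] = [cs] := by
  unfold PySem.Chars.splitOn
  rw [splitOn_no_space_go cs (cs.length + 1) [] [] (by omega) h]
  simp

-- L1: A's nextSubTree computes the scan content (prefixed by its accumulator)
theorem nextA_eq_scan (l : List Char) : ∀ (d : Int) (acc : List Char),
    nextSubTreeA l d acc = (pvScan l d).map (fun p => acc ++ p.1) := by
  induction l with
  | nil => intro d acc; simp [nextSubTreeA, pvScan]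
  | cons c rest ih =>
    intro d acc
    simp only [nextSubTreeA, pvScan]
    by_cases h0 : (if c = '(' then d + 1 else if c = ')' then d - 1 else d) = 0
    · simp [h0]
    · simp only [h0, ih]
      cases pvScan rest (if c = '(' then d + 1 else if c = ')' then d - 1 else d) <;> simp

-- L2: a successful scan decomposes the input as content ++ ')' ++ rest
theorem scan_decomp (l : List Char) : ∀ (d : Int) (n r : List Char), 1 ≤ d →
    pvScan l d = some (n, r) → l = n ++ ')' :: r := by
  induction l with
  | nil => intro d n r _ h; simp [pvScan] at h
  | cons c rest ih =>
    intro d n r hd h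
    simp only [pvScan] at h
    by_cases h0 : (if c = '(' then d + 1 else if c = ')' then d - 1 else d) = 0
    · rw [if_pos h0] at h
      have hc : c = ')' := by
        by_contra hc
        by_cases hp : c = '('
        · rw [if_pos hp] at h0; omega
        · rw [if_neg hp, if_neg hc] at h0; omega
      obtain ⟨hn, hr⟩ := by simpa using h
      simp [hc, ← hn, ← hr]
    · rw [if_neg h0] at h
      cases hs : pvScan rest (if c = '(' then d + 1 else if c = ')' then d - 1 else d) with
      | none => rw [hs] at h; simp at h
      | some p =>
        rw [hs] at h
        obtain ⟨hn, hr⟩ := by simpa using h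
        have hd' : 1 ≤ (if c = '(' then d + 1 else if c = ')' then d - 1 else d) := by
          split_ifs at h0 ⊢ <;> omega
        have := ih _ p.1 p.2 hd' (by rw [hs])
        simp [← hn, ← hr, this]

-- L3a: if the scan never closes, B ends inside the group and hits the raise path
theorem loopB_group_none (l : List Char) : ∀ (d : Int) (res : List (List Char)) (temp grp : List Char),
    1 ≤ d → pvScan l d = none → loopB l res temp grp d = [] := by
  induction l with
  | nil => intro d res temp grp hd _; simp [loopB]; omega
  | cons c rest ih =>
    intro d res temp grp hd hs
    have hdne : d ≠ 0 := by omega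
    by_cases hp : c = '('
    · subst hp
      have h1 : ¬ ((d : Int) + 1 = 0) := by omega
      simp only [pvScan, reduceIte, if_neg h1, Option.map_eq_none_iff] at hs
      simp only [loopB, reduceIte, if_neg hdne]
      exact ih (d + 1) res temp (grp ++ ['(']) (by omega) hs
    · by_cases hq : c = ')'
      · subst hq
        by_cases h1 : d - 1 = 0
        · simp only [pvScan, Char.reduceEq, reduceIte, if_pos h1] at hs
          simp at hs
        · simp only [pvScan, Char.reduceEq, reduceIte, if_neg h1, Option.map_eq_none_iff] at hs
          simp only [loopB, Char.reduceEq, reduceIte, if_neg hdne, if_neg h1]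
          exact ih (d - 1) res temp (grp ++ [')']) (by omega) hs
      · rw [show pvScan (c :: rest) d = (pvScan rest d).map (fun p => (c :: p.1, p.2)) from by
              simp [pvScan, hp, hq, hdne]] at hs
        rw [Option.map_eq_none_iff] at hs
        simp only [loopB, if_neg hdne, if_neg hp, if_neg hq]
        exact ih d res temp (grp ++ [c]) hd hs

-- L3b: B inside a group follows the scan, emitting '(' ++ grp ++ content ++ ')'
theorem loopB_group_some (l : List Char) : ∀ (d : Int) (res : List (List Char)) (temp grp n r : List Char),
    1 ≤ d → pvScan l d = some (n, r) →
    loopB l res temp grp d = loopB r (res ++ [('(' :: (grp ++ n)) ++ [')']]) temp (grp ++ n) 0 := by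
  induction l with
  | nil => intro d res temp grp n r hd hs; simp [pvScan] at hs
  | cons c rest ih =>
    intro d res temp grp n r hd hs
    have hdne : d ≠ 0 := by omega
    by_cases hp : c = '('
    · subst hp
      have h1 : ¬ ((d : Int) + 1 = 0) := by omega
      simp only [pvScan, reduceIte, if_neg h1] at hs
      cases hrec : pvScan rest (d + 1) with
      | none => rw [hrec] at hs; simp at hs
      | some p =>
        rw [hrec] at hs
        obtain ⟨hn, hr⟩ := by simpa using hs
        simp only [loopB, reduceIte, if_neg hdne]
        rw [ih (d + 1) res temp (grp ++ ['(']) p.1 p.2 (by omega) (by rw [hrec]), ← hn, ← hr]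
        simp [List.append_assoc]
    · by_cases hq : c = ')'
      · subst hq
        by_cases h1 : d - 1 = 0
        · simp only [pvScan, Char.reduceEq, reduceIte, if_pos h1] at hs
          obtain ⟨hn, hr⟩ := by simpa using hs
          subst hn; subst hr
          simp only [loopB, Char.reduceEq, reduceIte, if_neg hdne, if_pos h1]
          simp
        · simp only [pvScan, Char.reduceEq, reduceIte, if_neg h1] at hs
          cases hrec : pvScan rest (d - 1) with
          | none => rw [hrec] at hs; simp at hs
          | some p =>
            rw [hrec] at hs
            obtain ⟨hn, hr⟩ := by simpa using hs
            simp only [loopB, Char.reduceEq, reduceIte, if_neg hdne, if_neg h1]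
            rw [ih (d - 1) res temp (grp ++ [')']) p.1 p.2 (by omega) (by rw [hrec]), ← hn, ← hr]
            simp [List.append_assoc]
      · rw [show pvScan (c :: rest) d = (pvScan rest d).map (fun p => (c :: p.1, p.2)) from by
              simp [pvScan, hp, hq, hdne]] at hs
        cases hrec : pvScan rest d with
        | none => rw [hrec] at hs; simp at hs
        | some p =>
          rw [hrec] at hs
          obtain ⟨hn, hr⟩ := by simpa using hs
          simp only [loopB, if_neg hdne, if_neg hp, if_neg hq]
          rw [ih d res temp (grp ++ [c]) p.1 p.2 hd (by rw [hrec]), ← hn, ← hr]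
          simp [List.append_assoc]

-- main: at depth 0 the two loops agree (temp never contains a space)
theorem loopA_eq_loopB : ∀ (N : Nat) (l : List Char) (res : List (List Char)) (temp grp : List Char),
    l.length ≤ N → ' ' ∉ temp → loopA l res temp = loopB l res temp grp 0 := by
  intro N
  induction N with
  | zero =>
    intro l res temp grp hN _
    have : l = [] := List.eq_nil_of_length_eq_zero (by omega)
    subst this; simp [loopA, loopB]
  | succ N ih =>
    intro l res temp grp hN hsp
    match l with
    | [] => simp [loopA, loopB]
    | c :: rest =>
      by_cases hp : c = '('
      · have hflush : (if temp.length ≠ 0 then res ++ PySem.Chars.splitOn temp [' '] else res)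
            = (if temp ≠ [] then res ++ [temp] else res) := by
          by_cases ht : temp = []
          · simp [ht]
          · rw [if_pos (by simpa using ht), if_pos ht, splitOn_no_space temp hsp]
        simp only [loopA, loopB, if_pos hp, reduceIte, hflush]
        rw [nextA_eq_scan rest 1 []]
        cases hs : pvScan rest 1 with
        | none => rw [loopB_group_none rest 1 _ [] [] (by omega) hs]; simp
        | some p =>
          rw [loopB_group_some rest 1 _ [] [] p.1 p.2 (by omega) (by rw [hs])]
          have hdec := scan_decomp rest 1 p.1 p.2 (by omega) (by rw [hs])
          have hdrop : rest.drop (p.1.length + 1) = p.2 := by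
            rw [hdec, ← List.singleton_append, ← List.append_assoc]
            rw [List.drop_append_of_le_length (by simp)]
            simp
          have hlen : p.2.length ≤ N := by
            have : rest.length = p.1.length + 1 + p.2.length := by rw [hdec]; simp; omega
            simp at hN; omega
          simp only [Option.map_some, List.nil_append, hdrop]
          exact ih p.2 _ [] p.1 hlen (by simp)
      · have hA : loopA (c :: rest) res temp =
            (if ¬ (c = ' ' ∨ c = '\n' ∨ c = '\t') then loopA rest res (temp ++ [c])
             else loopA rest res temp) := by
          simp only [loopA, if_neg hp]
        have hB : loopB (c :: rest) res temp grp 0 =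
            (if ¬ (c = ' ' ∨ c = '\n' ∨ c = '\t') then loopB rest res (temp ++ [c]) grp 0
             else loopB rest res temp grp 0) := by
          simp only [loopB, reduceIte, if_neg hp]
        rw [hA, hB]
        by_cases hw : c = ' ' ∨ c = '\n' ∨ c = '\t'
        · rw [if_neg (not_not_intro hw), if_neg (not_not_intro hw)]
          exact ih rest res temp grp (by simpa using hN) hsp
        · rw [if_pos hw, if_pos hw]
          have hc : c ≠ ' ' := fun h => hw (Or.inl h)
          exact ih rest res (temp ++ [c]) grp (by simpa using hN)
            (by simp [hsp]; exact fun h => hc h.symm)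

-- ===== VERDICT (by name: the statement is the Claim_ definition above) =====
theorem simpleTREE_spec : Claim_equal_simpleTREE := by
  intro code _ _
  unfold Spec_simpleTREE simpleTREE simpleTREE_alt
  rw [loopA_eq_loopB code.toList.length code.toList [] [] [] le_rfl (by simp)]
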